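-- pv_equiv track=rewrite | github.com/Nikhil759/DSA-Topicwise-Solutions | GFG DSA/Arrays/longest_odd_eve_arr.py | odd_eve2
-- ===== SOURCE A (Python) =====
-- def odd_eve2(arr):
--     count=1
--     maxc=0
--     for i in range(1,len(arr)):
--         if (arr[i]%2==0 and arr[i-1]%2==1) or (arr[i]%2==1 and arr[i-1]%2==0):
--             count+=1
--             maxc=max(count,maxc)
--         else:
--             count=1
--     return max(maxc,count)
-- ===== SOURCE B (Python) =====
-- def odd_eve2(arr):
--     # Breakpoint decomposition: cut positions where adjacent parities agree,
--     # then the answer is the widest gap between consecutive cuts.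
--     n = len(arr)
--     breaks = [0] + [i for i in range(1, n) if arr[i] % 2 == arr[i - 1] % 2] + [n]
--     gaps = [b - a for a, b in zip(breaks, breaks[1:])]
--     return max(gaps)
-- ===== Notes on version B (the rewrite author's own statement) =====
-- stated objective: alternative
-- what changed: B abandons A's streak counter entirely: it computes the list of breakpoint positions (indices where adjacent parities agree, plus the two ends), and returns the maximum gap between consecutive breakpoints.
-- intended difference: On the empty list A returns 1 (the leftover initial count of a loop that never ran), while B returns 0, the length of the longest subarray of an empty array, which is the intended value. — e.g. on odd_eve2([]): A returns 1, B returns 0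
import Mathlib
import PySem

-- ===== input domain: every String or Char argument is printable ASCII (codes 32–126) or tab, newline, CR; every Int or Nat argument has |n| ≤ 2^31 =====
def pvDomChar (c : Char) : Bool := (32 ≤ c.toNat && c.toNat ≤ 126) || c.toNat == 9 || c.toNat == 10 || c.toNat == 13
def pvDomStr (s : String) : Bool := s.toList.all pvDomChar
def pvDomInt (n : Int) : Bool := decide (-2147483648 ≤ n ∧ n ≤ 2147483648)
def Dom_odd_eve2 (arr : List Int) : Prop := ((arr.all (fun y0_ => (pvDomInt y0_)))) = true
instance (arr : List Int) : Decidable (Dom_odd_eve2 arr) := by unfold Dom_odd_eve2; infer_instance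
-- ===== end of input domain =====

-- B replaces A's streak counter by a breakpoint decomposition (positions where adjacent
-- parities agree, plus the ends) and returns the widest gap between consecutive breakpoints;
-- on the empty list B returns 0 where A returns 1 (stated as the intended difference D_).

-- ===== PORT A =====
-- single scan over range(1, len): streak counter `count`, running max `maxc`
def odd_eve2 (arr : List Int) : Int :=
  let st := (PySem.List.pyRange 1 (PySem.List.len arr) 1).foldl
    (fun (s : Int × Int) i =>
      if ((PySem.Int.mod (PySem.List.pyGetD arr i 0) 2 == 0 &&
           PySem.Int.mod (PySem.List.pyGetD arr (i - 1) 0) 2 == 1) ||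
          (PySem.Int.mod (PySem.List.pyGetD arr i 0) 2 == 1 &&
           PySem.Int.mod (PySem.List.pyGetD arr (i - 1) 0) 2 == 0)) then
        (s.1 + 1, max (s.1 + 1) s.2)
      else
        (1, s.2)) (1, 0)
  max st.2 st.1

-- ===== PORT B =====
-- breakpoints (indices where adjacent parities agree) framed by 0 and n; answer = widest gap
def odd_eve2_alt (arr : List Int) : Int :=
  let n := PySem.List.len arr
  let breaks : List Int := [0] ++ (PySem.List.pyRange 1 n 1).filter
      (fun i => PySem.Int.mod (PySem.List.pyGetD arr i 0) 2 ==
                PySem.Int.mod (PySem.List.pyGetD arr (i - 1) 0) 2) ++ [n]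
  let gaps := (breaks.zip (PySem.List.slice breaks (some 1) none)).map (fun p => p.2 - p.1)
  match PySem.List.max? gaps (fun y => y) with
  | some m => m
  | none => 0   -- unreachable: breaks always has at least two elements

-- ===== PRECONDITION & SPEC =====
-- On the empty list A returns 1 (leftover initial count of a loop that never ran) while B
-- returns 0, the length of the longest subarray of an empty array, which is the intended value.
def D_odd_eve2 (arr : List Int) : Prop := arr = []
instance (arr : List Int) : Decidable (D_odd_eve2 arr) := by unfold D_odd_eve2; infer_instance
def Spec_odd_eve2 (arr : List Int) (out : Int) : Prop := ¬ D_odd_eve2 arr → out = odd_eve2_alt arr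
instance (arr : List Int) (out : Int) : Decidable (Spec_odd_eve2 arr out) := by unfold Spec_odd_eve2; infer_instance
def pvDiffWitness_odd_eve2 : List Int := []
def pvDiffWitnessOut_odd_eve2 : Int × Int := (1, 0)

-- ===== CLAIM (what is proved, stated in full; the proofs are below) =====
def Claim_unchanged_odd_eve2 : Prop := ∀ (arr : List Int), Dom_odd_eve2 arr → Spec_odd_eve2 arr (odd_eve2 arr)
def Claim_changed_odd_eve2 : Prop := Dom_odd_eve2 (pvDiffWitness_odd_eve2) ∧ D_odd_eve2 (pvDiffWitness_odd_eve2) ∧ odd_eve2 (pvDiffWitness_odd_eve2) = pvDiffWitnessOut_odd_eve2.1 ∧ odd_eve2_alt (pvDiffWitness_odd_eve2) = pvDiffWitnessOut_odd_eve2.2 ∧ pvDiffWitnessOut_odd_eve2.1 ≠ pvDiffWitnessOut_odd_eve2.2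
def Claim_exact_odd_eve2 : Prop := ∀ (arr : List Int), Dom_odd_eve2 arr → D_odd_eve2 arr → odd_eve2 arr ≠ odd_eve2_alt arr

-- ===== LEMMAS AND PROOFS =====

-- gap list of prev :: l, and its maximum (0-based)
def pvGl (prev : Int) : List Int → List Int
  | [] => []
  | x :: r => (x - prev) :: pvGl x r

def pvMg (prev : Int) : List Int → Int
  | [] => 0
  | x :: r => max (x - prev) (pvMg x r)

-- A's parity test, negated, is B's equality test
theorem cond_not (a b : Int) :
    (!((PySem.Int.mod a 2 == 0 && PySem.Int.mod b 2 == 1) ||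
       (PySem.Int.mod a 2 == 1 && PySem.Int.mod b 2 == 0))) =
    (PySem.Int.mod a 2 == PySem.Int.mod b 2) := by
  rcases PySem.Int.mod_two_eq a with ha | ha <;>
  rcases PySem.Int.mod_two_eq b with hb | hb <;> simp only [ha, hb] <;> decide

theorem zip_map_eq_gl (l : List Int) (prev : Int) :
    ((prev :: l).zip l).map (fun p : Int × Int => p.2 - p.1) = pvGl prev l := by
  induction l generalizing prev with
  | nil => simp [pvGl]
  | cons x r ih => simp [pvGl, List.zip_cons_cons, ih]

theorem foldl_max_gl (l : List Int) : ∀ (prev a : Int), l ≠ [] →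
    List.IsChain (· ≤ ·) (prev :: l) →
    (pvGl prev l).foldl max a = max a (pvMg prev l) := by
  induction l with
  | nil => intro _ _ h _; exact absurd rfl h
  | cons x r ih =>
    intro prev a _ hch
    have h1 : prev ≤ x := (List.isChain_cons_cons.mp hch).1
    have h2 : List.IsChain (· ≤ ·) (x :: r) := (List.isChain_cons_cons.mp hch).2
    cases r with
    | nil => simp [pvGl, pvMg]; omega
    | cons y r' =>
      have := ih x (max a (x - prev)) (by simp) h2
      simp only [pvGl, List.foldl_cons] at this ⊢
      rw [this]
      have : pvMg prev (x :: y :: r') = max (x - prev) (pvMg x (y :: r')) := rfl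
      omega

theorem max?_gl (prev : Int) (l : List Int) (hl : l ≠ [])
    (hch : List.IsChain (· ≤ ·) (prev :: l)) :
    PySem.List.max? (pvGl prev l) (fun y => y) = some (pvMg prev l) := by
  cases l with
  | nil => exact absurd rfl hl
  | cons x r =>
    have h1 : prev ≤ x := (List.isChain_cons_cons.mp hch).1
    have h2 : List.IsChain (· ≤ ·) (x :: r) := (List.isChain_cons_cons.mp hch).2
    show PySem.List.max? ((x - prev) :: pvGl x r) (fun y => y) = _
    rw [PySem.List.max?_id_cons]
    cases r with
    | nil => simp [pvGl, pvMg]; omega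
    | cons y r' =>
      rw [foldl_max_gl (y :: r') x (x - prev) (by simp) h2]
      have : pvMg prev (x :: y :: r') = max (x - prev) (pvMg x (y :: r')) := rfl
      simp [this]

-- the first gap of F ++ [n] from prev is at least s - prev when everything ahead is ≥ s
theorem mg_head_ge (prev s n : Int) (hn : s ≤ n) (F : List Int)
    (hF : ∀ y ∈ F, s ≤ y) : s - prev ≤ pvMg prev (F ++ [n]) := by
  cases F with
  | nil => simp [pvMg]; omega
  | cons y r =>
    have hy : s ≤ y := hF y (by simp)
    calc s - prev ≤ y - prev := by omega
      _ ≤ max (y - prev) (pvMg y (r ++ [n])) := le_max_left _ _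
      _ = pvMg prev ((y :: r) ++ [n]) := rfl

-- loop invariant: A's scan from state (count, maxc) equals maxc ⊔ (max gap of the
-- remaining breakpoints from prev), where count = s - prev is the open run's length
theorem inv_loop (c q : Int → Bool) (hq : ∀ i, q i = !(c i)) (n : Int) :
    ∀ (k : ℕ) (s prev count maxc : Int), n - s ≤ (k : Int) → count = s - prev →
    1 ≤ count → (count = 1 ∨ count ≤ maxc) → s ≤ n →
    (let ra := (PySem.List.pyRange s n 1).foldl
        (fun (st : Int × Int) i =>
          if c i then (st.1 + 1, max (st.1 + 1) st.2) else (1, st.2)) (count, maxc)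
     max ra.2 ra.1) =
      max maxc (pvMg prev (((PySem.List.pyRange s n 1).filter q) ++ [n])) := by
  intro k
  induction k with
  | zero =>
    intro s prev count maxc hk hc h1 _ hsn
    have hs : s = n := by omega
    subst hs
    rw [PySem.List.pyRange_one_eq_nil (le_refl s)]
    simp [pvMg]; omega
  | succ k ih =>
    intro s prev count maxc hk hc h1 hmx hsn
    by_cases hlt : s < n
    · rw [PySem.List.pyRange_one_cons hlt]
      have hhead : ∀ y ∈ (PySem.List.pyRange (s+1) n 1).filter q, s + 1 ≤ y := by
        intro y hy
        exact ((PySem.List.mem_pyRange_one).mp (List.mem_of_mem_filter hy)).1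
      have hgap : s + 1 - prev ≤
          pvMg prev (((PySem.List.pyRange (s+1) n 1).filter q) ++ [n]) :=
        mg_head_ge prev (s+1) n (by omega) _ hhead
      have hgap1 : (1 : Int) ≤ pvMg s (((PySem.List.pyRange (s+1) n 1).filter q) ++ [n]) := by
        have := mg_head_ge s (s+1) n (by omega) _ hhead
        omega
      by_cases hcs : c s
      · have hqs : q s = false := by rw [hq, hcs]; rfl
        simp only [List.foldl_cons, List.filter_cons, hqs, hcs, if_true, Bool.false_eq_true,
          if_false]
        rw [ih (s+1) prev (count+1) (max (count+1) maxc) (by omega) (by omega) (by omega)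
          (Or.inr (le_max_left _ _)) (by omega)]
        omega
      · have hqs : q s = true := by rw [hq]; simp [hcs]
        simp only [List.foldl_cons, List.filter_cons, hqs, hcs, if_true, Bool.false_eq_true,
          if_false]
        rw [ih (s+1) s 1 maxc (by omega) (by omega) (by omega) (Or.inl rfl) (by omega)]
        have : pvMg prev (s :: (((PySem.List.pyRange (s+1) n 1).filter q) ++ [n])) =
            max (s - prev) (pvMg s (((PySem.List.pyRange (s+1) n 1).filter q) ++ [n])) := rfl
        simp only [List.cons_append] at this ⊢
        rw [this]
        omega
    · have hs : s = n := by omega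
      subst hs
      rw [PySem.List.pyRange_one_eq_nil (le_refl s)]
      simp [pvMg]; omega

-- ===== VERDICT (by name: the statements are the Claim_ definitions above) =====
theorem odd_eve2_spec : Claim_unchanged_odd_eve2 := by
  intro arr _ hD
  show odd_eve2 arr = odd_eve2_alt arr
  have hne : arr ≠ [] := hD
  have hlen : 1 ≤ (arr.length : Int) := by
    have : arr.length ≠ 0 := by simpa using hne
    omega
  set n : Int := (arr.length : Int) with hn
  set q : Int → Bool := fun i => PySem.Int.mod (PySem.List.pyGetD arr i 0) 2 ==
      PySem.Int.mod (PySem.List.pyGetD arr (i - 1) 0) 2 with hqdef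
  set c : Int → Bool := fun i =>
      ((PySem.Int.mod (PySem.List.pyGetD arr i 0) 2 == 0 &&
        PySem.Int.mod (PySem.List.pyGetD arr (i - 1) 0) 2 == 1) ||
       (PySem.Int.mod (PySem.List.pyGetD arr i 0) 2 == 1 &&
        PySem.Int.mod (PySem.List.pyGetD arr (i - 1) 0) 2 == 0)) with hcdef
  have hq : ∀ i, q i = !(c i) := by
    intro i; rw [hqdef, hcdef]; exact (cond_not _ _).symm
  set F : List Int := (PySem.List.pyRange 1 n 1).filter q with hF
  have hFmem : ∀ y ∈ F, 1 ≤ y ∧ y < n := by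
    intro y hy
    exact (PySem.List.mem_pyRange_one).mp (List.mem_of_mem_filter hy)
  -- A's value
  have hA : odd_eve2 arr = max 0 (pvMg 0 (F ++ [n])) := by
    have := inv_loop c q hq n (n - 1).toNat 1 0 1 0 (by omega) (by omega) (by omega)
      (Or.inl rfl) (by omega)
    unfold odd_eve2
    simp only [PySem.List.len_eq, ← hn] at *
    exact this
  -- the breakpoint list is a ≤-chain
  have hchain : List.IsChain (· ≤ ·) ((0 : Int) :: (F ++ [n])) := by
    rw [List.isChain_iff_pairwise]
    have hpF : F.Pairwise (· < ·) :=
      (PySem.List.pairwise_lt_pyRange_one 1 n).filter q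
    constructor
    · intro y hy
      rcases List.mem_append.mp hy with h | h
      · exact le_of_lt (by have := hFmem y h; omega)
      · simp at h; omega
    · rw [List.pairwise_append]
      refine ⟨hpF.imp le_of_lt, by simp, ?_⟩
      intro a ha b hb
      simp at hb; subst hb
      exact le_of_lt (hFmem a ha).2
  have hgap1 : (1 : Int) ≤ pvMg 0 (F ++ [n]) := by
    have := mg_head_ge 0 1 n hlen F (fun y hy => (hFmem y hy).1)
    omega
  -- B's value
  have hB : odd_eve2_alt arr = pvMg 0 (F ++ [n]) := by
    unfold odd_eve2_alt
    simp only [PySem.List.len_eq, ← hn, ← hqdef, PySem.List.slice_from_one, List.cons_append, List.nil_append, List.tail_cons,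
      ← hF]
    rw [zip_map_eq_gl (F ++ [n]) 0,
      max?_gl 0 (F ++ [n]) (by simp) hchain]
  rw [hA, hB]
  omega

theorem odd_eve2_changed : Claim_changed_odd_eve2 := by
  unfold Claim_changed_odd_eve2; decide

theorem odd_eve2_tight : Claim_exact_odd_eve2 := by
  intro arr _ hD
  subst hD
  decide
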